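-- pv_equiv track=rewrite | github.com/AndyRewLy/HELP | backend/user_clustering.py | getHighestComparison
-- ===== SOURCE A (Python) =====
-- def getHighestComparison(userSimilarities, username):
--
--    matchedActivityUsers = []
--    activityMax = 0
--    matchedFoodUsers = []
--    foodMax = 0
--    highestMatch = userSimilarities[username]
--
--    for key, value in highestMatch.items():
--       activityValue = value['activity']
--
--       if activityValue > activityMax:
--          matchedActivityUsers = [key]
--          activityMax = activityValue
--       elif activityValue == activityMax and activityValue != 0:
--          matchedActivityUsers.append(key)
--
--    for key, value in highestMatch.items():
--       foodValue = value['food']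
--
--       if foodValue > foodMax:
--          matchedFoodUsers = [key]
--          foodMax = foodValue
--       elif foodValue == foodMax and foodValue != 0:
--          matchedFoodUsers.append(key)
--
--    return (matchedActivityUsers, matchedFoodUsers)
-- ===== SOURCE B (Python) =====
-- def getHighestComparison(userSimilarities, username):
--     highestMatch = userSimilarities[username]
--
--     def matched(field):
--         theMax = max((v[field] for v in highestMatch.values()), default=0)
--         if theMax <= 0:
--             return []
--         return [k for k, v in highestMatch.items() if v[field] == theMax]
--
--     return (matched('activity'), matched('food'))
-- ===== Notes on version B (the rewrite author's own statement) =====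
-- stated objective: simpler
-- what changed: Replaces A's two interleaved running-max-with-tie-collection loops (resetting the matched list on each new maximum) by a two-phase pass per field: compute the maximum with max(..., default=0), then filter the keys that achieve it when it is positive.
import Mathlib
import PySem

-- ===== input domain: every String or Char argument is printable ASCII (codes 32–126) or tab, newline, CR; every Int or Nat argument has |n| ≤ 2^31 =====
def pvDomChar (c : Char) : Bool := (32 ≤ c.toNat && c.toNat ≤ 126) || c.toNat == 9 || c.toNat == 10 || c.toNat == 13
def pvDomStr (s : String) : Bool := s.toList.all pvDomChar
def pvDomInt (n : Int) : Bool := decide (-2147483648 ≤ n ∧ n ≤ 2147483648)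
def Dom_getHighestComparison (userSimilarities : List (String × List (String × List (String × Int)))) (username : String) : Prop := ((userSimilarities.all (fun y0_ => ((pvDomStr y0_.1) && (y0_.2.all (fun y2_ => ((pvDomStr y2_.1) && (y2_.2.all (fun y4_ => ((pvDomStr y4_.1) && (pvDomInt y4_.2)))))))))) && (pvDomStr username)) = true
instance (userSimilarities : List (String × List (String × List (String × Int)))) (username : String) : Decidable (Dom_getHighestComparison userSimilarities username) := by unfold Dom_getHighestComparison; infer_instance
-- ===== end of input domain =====

-- B replaces A's two interleaved running-max-with-tie-collection loops by a two-phase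
-- compute-the-maximum-then-filter pass per field; same results, same O(n) cost.

-- ===== PORT A =====
-- literal transliteration of A: two separate foldl loops, each carrying (matchedUsers, max)
def getHighestComparison (userSimilarities : List (String × List (String × List (String × Int)))) (username : String) : List String × List String :=
  let highestMatch := PySem.Dict.getD (PySem.Dict.mk userSimilarities) username []   -- userSimilarities[username]; KeyError excluded by Pre_
  let st1 := highestMatch.foldl (fun st kv =>
      let activityValue := PySem.Dict.getD (PySem.Dict.mk kv.2) "activity" 0   -- value['activity']; KeyError excluded by Pre_
      if activityValue > st.2 then ([kv.1], activityValue)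
      else if activityValue = st.2 ∧ activityValue ≠ 0 then (st.1 ++ [kv.1], st.2)
      else st) (([] : List String), (0 : Int))
  let st2 := highestMatch.foldl (fun st kv =>
      let foodValue := PySem.Dict.getD (PySem.Dict.mk kv.2) "food" 0   -- value['food']; KeyError excluded by Pre_
      if foodValue > st.2 then ([kv.1], foodValue)
      else if foodValue = st.2 ∧ foodValue ≠ 0 then (st.1 ++ [kv.1], st.2)
      else st) (([] : List String), (0 : Int))
  (st1.1, st2.1)

-- ===== PORT B =====
-- B's helper matched(field): maximum with default 0, then filter the keys achieving it
def pvMatched (highestMatch : List (String × List (String × Int))) (field : String) : List String :=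
  let theMax := PySem.List.maxD (highestMatch.map (fun kv => PySem.Dict.getD (PySem.Dict.mk kv.2) field 0)) id 0
  if theMax ≤ 0 then []
  else (highestMatch.filter (fun kv => PySem.Dict.getD (PySem.Dict.mk kv.2) field 0 == theMax)).map Prod.fst

def getHighestComparison_alt (userSimilarities : List (String × List (String × List (String × Int)))) (username : String) : List String × List String :=
  let highestMatch := PySem.Dict.getD (PySem.Dict.mk userSimilarities) username []
  (pvMatched highestMatch "activity", pvMatched highestMatch "food")

-- ===== PRECONDITION & SPEC =====
-- Pre_ excludes exactly the inputs where the Python A raises KeyError (username not a key,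
-- or an inner profile missing 'activity' or 'food') and association lists with duplicate
-- keys, which a real Python dict cannot represent.
def Pre_getHighestComparison (userSimilarities : List (String × List (String × List (String × Int)))) (username : String) : Prop :=
  (userSimilarities.map Prod.fst).Nodup ∧
  username ∈ userSimilarities.map Prod.fst ∧
  ∀ p ∈ userSimilarities, p.1 = username →
    (p.2.map Prod.fst).Nodup ∧
    ∀ q ∈ p.2, (q.2.map Prod.fst).Nodup ∧
      "activity" ∈ q.2.map Prod.fst ∧ "food" ∈ q.2.map Prod.fst
instance (userSimilarities : List (String × List (String × List (String × Int)))) (username : String) : Decidable (Pre_getHighestComparison userSimilarities username) := by unfold Pre_getHighestComparison; infer_instance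

def pvWitness_getHighestComparison : (List (String × List (String × List (String × Int)))) × String :=
  ([("me", [("u1", [("activity", (2:Int)), ("food", (0:Int))]),
            ("u2", [("activity", (2:Int)), ("food", (-1:Int))])])], "me")

def Spec_getHighestComparison (userSimilarities : List (String × List (String × List (String × Int)))) (username : String) (out : List String × List String) : Prop := out = getHighestComparison_alt userSimilarities username
instance (userSimilarities : List (String × List (String × List (String × Int)))) (username : String) (out : List String × List String) : Decidable (Spec_getHighestComparison userSimilarities username out) := by unfold Spec_getHighestComparison; infer_instance

-- ===== CLAIM (what is proved, stated in full; the proofs are below) =====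
def Claim_equal_getHighestComparison : Prop := ∀ (userSimilarities : List (String × List (String × List (String × Int)))) (username : String), Dom_getHighestComparison userSimilarities username → Pre_getHighestComparison userSimilarities username → Spec_getHighestComparison userSimilarities username (getHighestComparison userSimilarities username)

-- ===== LEMMAS AND PROOFS =====

-- Python's max(l, default=0) for a nonempty Int list is the plain max fold from the head
lemma pvMaxOpt : ∀ (l : List Int) (c : Int),
    PySem.List.max? (c :: l) id = some (l.foldl max c)
  | [], _ => rfl
  | x :: l, c => by
      have hx := pvMaxOpt l x
      have hc := pvMaxOpt l c
      simp only [PySem.List.max?, List.foldl_cons, id_eq] at hx hc ⊢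
      by_cases h : c < x
      · rw [if_pos h, hx, max_eq_right h.le]
      · rw [if_neg h, hc, max_eq_left (not_lt.mp h)]

-- foldl max over a prepended element distributes
lemma pvFoldlMax (l : List Int) (a b : Int) :
    l.foldl max (max a b) = max a (l.foldl max b) := by
  induction l generalizing b with
  | nil => rfl
  | cons x l ih =>
      simp only [List.foldl_cons, max_assoc]
      exact ih (max b x)

-- foldl max 0 versus Python's max(..., default=0)
lemma pvMaxD (l : List Int) :
    l.foldl max 0 = max 0 (PySem.List.maxD l id 0) := by
  cases l with
  | nil => rfl
  | cons x l =>
      rw [PySem.List.maxD, pvMaxOpt l x, Option.getD_some, List.foldl_cons]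
      exact pvFoldlMax l 0 x

-- characterisation of A's running-max-plus-tie-collection loop over (key, value) pairs
lemma pvLoop (l : List (String × Int)) (acc : List String) (mx : Int) (h0 : 0 ≤ mx) :
    l.foldl (fun st kv =>
        if kv.2 > st.2 then ([kv.1], kv.2)
        else if kv.2 = st.2 ∧ kv.2 ≠ 0 then (st.1 ++ [kv.1], st.2)
        else st) (acc, mx)
    = (let M := l.foldl (fun m p => max m p.2) mx
       if mx < M then ((l.filter (fun p => p.2 == M)).map Prod.fst, M)
       else if mx = 0 then (acc, mx)
       else (acc ++ (l.filter (fun p => p.2 == mx)).map Prod.fst, mx)) := by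
  induction l generalizing acc mx with
  | nil => simp
  | cons p l ih =>
      have hM : ∀ b : Int, b ≤ l.foldl (fun m q => max m q.2) b := by
        intro b
        rw [show l.foldl (fun m q => max m q.2) b = (l.map Prod.snd).foldl max b by
          rw [List.foldl_map]]
        exact (PySem.List.le_foldl_max _ b).1
      simp only [List.foldl_cons]
      by_cases h1 : p.2 > mx
      · rw [if_pos h1, ih [p.1] p.2 (by omega)]
        have hmx : max mx p.2 = p.2 := max_eq_right (le_of_lt h1)
        simp only [hmx]
        set M := l.foldl (fun m q => max m q.2) p.2 with hMdef
        have hpM : p.2 ≤ M := hM p.2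
        have hlt : mx < M := by omega
        rw [if_pos hlt]
        by_cases h2 : p.2 < M
        · rw [if_pos h2]
          have : (p.2 == M) = false := by simp only [beq_eq_false_iff_ne, ne_eq]; omega
          simp [this]
        · have hEq : p.2 = M := by omega
          rw [if_neg h2, if_neg (show ¬ p.2 = 0 by omega)]
          have hb : (p.2 == M) = true := by simp [hEq]
          simp [← hEq]
      · rw [if_neg h1]
        have hmx : max mx p.2 = mx := max_eq_left (by omega)
        by_cases h2 : p.2 = mx ∧ p.2 ≠ 0
        · have hmx0 : ¬ mx = 0 := fun h => h2.2 (h2.1.trans h)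
          rw [if_pos h2, ih (acc ++ [p.1]) mx h0]
          simp only [hmx]
          set M := l.foldl (fun m q => max m q.2) mx with hMdef
          by_cases h3 : mx < M
          · rw [if_pos h3, if_pos h3]
            have : (p.2 == M) = false := by simp only [beq_eq_false_iff_ne, ne_eq]; omega
            simp [this]
          · rw [if_neg h3, if_neg h3, if_neg hmx0, if_neg hmx0]
            have : (p.2 == mx) = true := by simp [h2.1]
            simp [this]
        · rw [if_neg h2, ih acc mx h0]
          simp only [hmx]
          set M := l.foldl (fun m q => max m q.2) mx with hMdef
          have hp : p.2 < mx ∨ (p.2 = mx ∧ p.2 = 0) := by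
            by_cases he : p.2 = mx
            · refine Or.inr ⟨he, ?_⟩
              rcases not_and_or.mp h2 with h | h
              · exact absurd he h
              · omega
            · exact Or.inl (by omega)
          by_cases h3 : mx < M
          · rw [if_pos h3, if_pos h3]
            have : (p.2 == M) = false := by simp only [beq_eq_false_iff_ne, ne_eq]; omega
            simp [this]
          · rw [if_neg h3, if_neg h3]
            by_cases h4 : mx = 0
            · rw [if_pos h4, if_pos h4]
            · rw [if_neg h4, if_neg h4]
              have : (p.2 == mx) = false := by simp only [beq_eq_false_iff_ne, ne_eq]; omega
              simp [this]

-- one pass of A (over the raw association list, looking the field up each step)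
-- equals B's pvMatched
lemma pvPass (hm : List (String × List (String × Int))) (field : String) :
    (hm.foldl (fun st kv =>
        let v := PySem.Dict.getD (PySem.Dict.mk kv.2) field 0
        if v > st.2 then ([kv.1], v)
        else if v = st.2 ∧ v ≠ 0 then (st.1 ++ [kv.1], st.2)
        else st) (([] : List String), (0 : Int))).1
    = pvMatched hm field := by
  set f : String × List (String × Int) → Int :=
    fun kv => PySem.Dict.getD (PySem.Dict.mk kv.2) field 0 with hf
  have hmap : hm.foldl (fun st kv =>
        let v := f kv
        if v > st.2 then ([kv.1], v)
        else if v = st.2 ∧ v ≠ 0 then (st.1 ++ [kv.1], st.2)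
        else st) (([] : List String), (0 : Int))
      = (hm.map (fun kv => (kv.1, f kv))).foldl (fun st kv =>
        if kv.2 > st.2 then ([kv.1], kv.2)
        else if kv.2 = st.2 ∧ kv.2 ≠ 0 then (st.1 ++ [kv.1], st.2)
        else st) (([] : List String), (0 : Int)) := by
    rw [List.foldl_map]
  rw [hmap, pvLoop _ [] 0 le_rfl]
  set l := hm.map (fun kv => (kv.1, f kv)) with hl
  have hMax : l.foldl (fun m p => max m p.2) 0 = (hm.map f).foldl max 0 := by
    rw [hl, List.foldl_map, List.foldl_map]
  set T := PySem.List.maxD (hm.map f) id 0 with hT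
  have hmaxd : (hm.map f).foldl max 0 = max 0 T := pvMaxD _
  simp only [hMax, hmaxd]
  unfold pvMatched
  rw [← hf, ← hT]
  by_cases hpos : 0 < T
  · rw [max_eq_right hpos.le, if_pos hpos, if_neg (not_le.mpr hpos)]
    rw [hl, List.filter_map, List.map_map]
    rfl
  · simp [not_lt.mp hpos]

-- ===== VERDICT (by name: the statement is the Claim_ definition above) =====
theorem getHighestComparison_spec : Claim_equal_getHighestComparison := by
  intro us username _ _
  unfold Spec_getHighestComparison getHighestComparison getHighestComparison_alt
  simp only
  exact Prod.ext (pvPass _ "activity") (pvPass _ "food")
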